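-- pv_equiv track=rewrite | github.com/lhs961021/python_algorithm | practice/20_분할정복/11444.py | solution
-- ===== SOURCE A (Python) =====
-- def solution(a,b): #a와 b는 그래프(행렬)
--
--   product = [[0]*2 for _ in range(2)]
--
--   for i in range(2): # 2X2 행렬
--     for j in range(2): # 2X2 행렬
--       for k in range(2): # 2X2 행렬
--         product[i][j] += a[i][k] * b[k][j]
--       product[i][j]%=1000000007
--
--   return product #곱한 행렬을 반환
-- ===== SOURCE B (Python) =====
-- def solution(a, b):
--     # Strassen's algorithm: 7 multiplications instead of 8; exact over the
--     # integers, so each entry mod 1e9+7 equals the classical dot product mod 1e9+7.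
--     M = 1000000007
--     m1 = (a[0][0] + a[1][1]) * (b[0][0] + b[1][1])
--     m2 = (a[1][0] + a[1][1]) * b[0][0]
--     m3 = a[0][0] * (b[0][1] - b[1][1])
--     m4 = a[1][1] * (b[1][0] - b[0][0])
--     m5 = (a[0][0] + a[0][1]) * b[1][1]
--     m6 = (a[1][0] - a[0][0]) * (b[0][0] + b[0][1])
--     m7 = (a[0][1] - a[1][1]) * (b[1][0] + b[1][1])
--     return [[(m1 + m4 - m5 + m7) % M, (m3 + m5) % M],
--             [(m2 + m4) % M, (m1 - m2 + m3 + m6) % M]]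
-- ===== Notes on version B (the rewrite author's own statement) =====
-- stated objective: alternative
-- what changed: Replaces the triple nested loop over a mutable accumulator matrix (8 multiplications) by Strassen's algorithm: 7 products m1..m7 of sums/differences combined into the four entries, each reduced mod 1000000007 once; exact over the integers, so entries agree with the classical dot products.
import Mathlib
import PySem

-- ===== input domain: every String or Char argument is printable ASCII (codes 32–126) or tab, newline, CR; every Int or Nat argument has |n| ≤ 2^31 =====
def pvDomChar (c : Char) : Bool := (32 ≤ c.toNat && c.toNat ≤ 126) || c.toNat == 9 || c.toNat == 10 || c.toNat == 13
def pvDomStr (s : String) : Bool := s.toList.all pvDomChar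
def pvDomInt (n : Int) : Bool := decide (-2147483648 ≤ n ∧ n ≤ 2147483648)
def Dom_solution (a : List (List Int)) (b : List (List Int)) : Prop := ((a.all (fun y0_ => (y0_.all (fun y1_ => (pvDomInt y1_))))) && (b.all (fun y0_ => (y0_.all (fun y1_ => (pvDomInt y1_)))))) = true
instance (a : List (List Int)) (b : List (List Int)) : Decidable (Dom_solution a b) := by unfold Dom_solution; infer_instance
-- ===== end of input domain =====

-- B replaces A's triple loop over a mutable 2x2 accumulator by Strassen's
-- 7-multiplication algorithm (alternative); no change in behaviour on Pre_.
-- ===== PORT A =====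
-- xs[i] read / xs[i] = v write; exact under Pre_solution (all indices in range; the
-- IndexError cases are excluded by Pre_solution).
def pvGet2 (xs : List (List Int)) (i j : Int) : Int :=
  PySem.List.pyGetD (PySem.List.pyGetD xs i []) j 0
def pvSet2 (xs : List (List Int)) (i j : Int) (v : Int) : List (List Int) :=
  PySem.List.pySetD xs i (PySem.List.pySetD (PySem.List.pyGetD xs i []) j v)

def solution (a : List (List Int)) (b : List (List Int)) : List (List Int) :=
  let product : List (List Int) := [[0, 0], [0, 0]]
  (PySem.List.pyRange 0 2 1).foldl (fun product i =>
    (PySem.List.pyRange 0 2 1).foldl (fun product j =>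
      let product := (PySem.List.pyRange 0 2 1).foldl (fun product k =>
        pvSet2 product i j (pvGet2 product i j + pvGet2 a i k * pvGet2 b k j)) product
      pvSet2 product i j (PySem.Int.mod (pvGet2 product i j) 1000000007)) product) product

-- ===== PORT B =====
def solution_alt (a : List (List Int)) (b : List (List Int)) : List (List Int) :=
  let m : Int := 1000000007
  let m1 := (pvGet2 a 0 0 + pvGet2 a 1 1) * (pvGet2 b 0 0 + pvGet2 b 1 1)
  let m2 := (pvGet2 a 1 0 + pvGet2 a 1 1) * pvGet2 b 0 0
  let m3 := pvGet2 a 0 0 * (pvGet2 b 0 1 - pvGet2 b 1 1)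
  let m4 := pvGet2 a 1 1 * (pvGet2 b 1 0 - pvGet2 b 0 0)
  let m5 := (pvGet2 a 0 0 + pvGet2 a 0 1) * pvGet2 b 1 1
  let m6 := (pvGet2 a 1 0 - pvGet2 a 0 0) * (pvGet2 b 0 0 + pvGet2 b 0 1)
  let m7 := (pvGet2 a 0 1 - pvGet2 a 1 1) * (pvGet2 b 1 0 + pvGet2 b 1 1)
  [[PySem.Int.mod (m1 + m4 - m5 + m7) m, PySem.Int.mod (m3 + m5) m],
   [PySem.Int.mod (m2 + m4) m, PySem.Int.mod (m1 - m2 + m3 + m6) m]]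

-- ===== PRECONDITION & SPEC =====
-- Pre_ excludes exactly the inputs where Python A raises IndexError: it reads rows 0 and 1
-- of a and b and columns 0 and 1 of each of those rows.
def Pre_solution (a : List (List Int)) (b : List (List Int)) : Prop :=
  2 ≤ a.length ∧ 2 ≤ b.length ∧
  (∀ r ∈ a.take 2, 2 ≤ r.length) ∧ (∀ r ∈ b.take 2, 2 ≤ r.length)
instance (a : List (List Int)) (b : List (List Int)) : Decidable (Pre_solution a b) := by
  unfold Pre_solution; infer_instance
def pvWitness_solution : List (List Int) × List (List Int) :=
  ([[1, 2], [3, 4]], [[5, 6], [7, 8]])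
def Spec_solution (a : List (List Int)) (b : List (List Int)) (out : List (List Int)) : Prop := out = solution_alt a b
instance (a : List (List Int)) (b : List (List Int)) (out : List (List Int)) : Decidable (Spec_solution a b out) := by unfold Spec_solution; infer_instance

-- ===== CLAIM (what is proved, stated in full; the proofs are below) =====
def Claim_equal_solution : Prop := ∀ (a : List (List Int)) (b : List (List Int)), Dom_solution a b → Pre_solution a b → Spec_solution a b (solution a b)

-- ===== LEMMAS AND PROOFS =====
-- Evaluation helpers for the proof: pvGet2 / pvSet2 on a concrete 2x2 list.
theorem pvRange2 : PySem.List.pyRange 0 2 1 = [0, 1] := by decide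
theorem pvG00 (w x y z : Int) : pvGet2 [[w, x], [y, z]] 0 0 = w := rfl
theorem pvG01 (w x y z : Int) : pvGet2 [[w, x], [y, z]] 0 1 = x := rfl
theorem pvG10 (w x y z : Int) : pvGet2 [[w, x], [y, z]] 1 0 = y := rfl
theorem pvG11 (w x y z : Int) : pvGet2 [[w, x], [y, z]] 1 1 = z := rfl
theorem pvS00 (w x y z v : Int) : pvSet2 [[w, x], [y, z]] 0 0 v = [[v, x], [y, z]] := rfl
theorem pvS01 (w x y z v : Int) : pvSet2 [[w, x], [y, z]] 0 1 v = [[w, v], [y, z]] := rfl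
theorem pvS10 (w x y z v : Int) : pvSet2 [[w, x], [y, z]] 1 0 v = [[w, x], [v, z]] := rfl
theorem pvS11 (w x y z v : Int) : pvSet2 [[w, x], [y, z]] 1 1 v = [[w, x], [y, v]] := rfl

-- ===== VERDICT (by name: the statement is the Claim_ definition above) =====
theorem solution_spec : Claim_equal_solution := by
  intro a b _ _
  show solution a b = solution_alt a b
  simp only [solution, solution_alt, pvRange2, List.foldl_cons, List.foldl_nil]
  simp only [pvG00, pvG01, pvG10, pvG11, pvS00, pvS01, pvS10, pvS11, zero_add]
  congr 2 <;> ring_nf
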